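-- pv_equiv track=rewrite | github.com/CATrainer/revu | backend/app/services/rule_evaluator.py | _prefer_action_order
-- ===== SOURCE A (Python) =====
-- from typing import Any, Dict, List, Optional, Tuple
--
-- def _prefer_action_order(new_actions: List[str], ex_actions: List[str]) -> str:
--     # Fixed preference: delete > flag > generate
--     order = {"delete_comment": 3, "flag_for_review": 2, "generate_response": 1}
--     def score(acts: List[str]) -> int:
--         return max((order.get(a, 0) for a in acts), default=0)
--     n, e = score(new_actions), score(ex_actions)
--     if n > e:
--         return "new"
--     if e > n:
--         return "existing"
--     return "tie"
-- ===== SOURCE B (Python) =====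
-- def _prefer_action_order(new_actions, ex_actions):
--     # Walk the priority tiers from highest to lowest; decide at the first tier
--     # present on only one side.
--     for tier in ("delete_comment", "flag_for_review", "generate_response"):
--         has_new = tier in new_actions
--         has_ex = tier in ex_actions
--         if has_new and has_ex:
--             return "tie"
--         if has_new:
--             return "new"
--         if has_ex:
--             return "existing"
--     return "tie"
-- ===== Notes on version B (the rewrite author's own statement) =====
-- stated objective: alternative
-- what changed: Replaced the score-dict plus max-and-compare computation with a direct walk over the priority tiers in descending order, returning at the first tier whose membership differs between the two lists (tie if shared or if no recognized action occurs).
import Mathlib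
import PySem

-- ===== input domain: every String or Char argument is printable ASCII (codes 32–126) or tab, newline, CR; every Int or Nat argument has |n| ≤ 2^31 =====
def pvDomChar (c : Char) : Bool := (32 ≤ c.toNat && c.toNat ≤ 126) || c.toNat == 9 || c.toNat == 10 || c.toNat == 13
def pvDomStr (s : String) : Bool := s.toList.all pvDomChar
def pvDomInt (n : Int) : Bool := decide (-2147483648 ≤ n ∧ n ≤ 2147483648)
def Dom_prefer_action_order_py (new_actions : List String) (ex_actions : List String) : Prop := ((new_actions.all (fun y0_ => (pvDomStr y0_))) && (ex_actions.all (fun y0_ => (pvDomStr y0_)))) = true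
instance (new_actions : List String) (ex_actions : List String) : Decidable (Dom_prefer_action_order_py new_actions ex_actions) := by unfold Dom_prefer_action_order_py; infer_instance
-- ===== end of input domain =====

-- B replaces A's score-dict + max computation by a direct walk over the priority
-- tiers in descending order, deciding at the first tier present on only one side
-- (objective: alternative decomposition, same cost).


-- ===== PORT A =====
-- order = {"delete_comment": 3, "flag_for_review": 2, "generate_response": 1}
def pvOrder : PySem.Dict String Int :=
  PySem.Dict.ofList [("delete_comment", 3), ("flag_for_review", 2), ("generate_response", 1)]

-- def score(acts): return max((order.get(a, 0) for a in acts), default=0)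
def pvScore (acts : List String) : Int :=
  PySem.List.maxD (acts.map (fun a => pvOrder.getD a 0)) (fun v => v) 0

def prefer_action_order_py (new_actions : List String) (ex_actions : List String) : String :=
  let n := pvScore new_actions
  let e := pvScore ex_actions
  if n > e then "new"
  else if e > n then "existing"
  else "tie"

-- ===== PORT B =====
-- for tier in (...): decide at the first tier whose membership differs
def pvTierLoop (new_actions ex_actions : List String) : List String → String
  | [] => "tie"
  | t :: rest =>
    let hasNew := new_actions.contains t
    let hasEx := ex_actions.contains t
    if hasNew && hasEx then "tie"
    else if hasNew then "new"
    else if hasEx then "existing"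
    else pvTierLoop new_actions ex_actions rest

def prefer_action_order_py_alt (new_actions : List String) (ex_actions : List String) : String :=
  pvTierLoop new_actions ex_actions ["delete_comment", "flag_for_review", "generate_response"]

-- ===== PRECONDITION & SPEC =====
def Spec_prefer_action_order_py (new_actions : List String) (ex_actions : List String) (out : String) : Prop := out = prefer_action_order_py_alt new_actions ex_actions
instance (new_actions : List String) (ex_actions : List String) (out : String) : Decidable (Spec_prefer_action_order_py new_actions ex_actions out) := by unfold Spec_prefer_action_order_py; infer_instance

-- ===== CLAIM (what is proved, stated in full; the proofs are below) =====
def Claim_equal_prefer_action_order_py : Prop := ∀ (new_actions : List String) (ex_actions : List String), Dom_prefer_action_order_py new_actions ex_actions → Spec_prefer_action_order_py new_actions ex_actions (prefer_action_order_py new_actions ex_actions)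

-- ===== LEMMAS AND PROOFS =====

-- the per-element score as a plain if-chain
theorem pvOrder_getD (x : String) : pvOrder.getD x 0 =
    if x = "delete_comment" then 3 else if x = "flag_for_review" then 2
    else if x = "generate_response" then 1 else 0 := by
  have h : pvOrder = PySem.Dict.mk
      [("delete_comment", 3), ("flag_for_review", 2), ("generate_response", 1)] := by decide
  by_cases h1 : x = "delete_comment"
  · subst h1; decide
  by_cases h2 : x = "flag_for_review"
  · subst h2; decide
  by_cases h3 : x = "generate_response"
  · subst h3; decide
  rw [h]
  simp only [PySem.Dict.getD, PySem.Dict.get?_mk_cons, beq_iff_eq, h1, h2, h3, if_false]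
  simp [Ne.symm h1, Ne.symm h2, Ne.symm h3, PySem.Dict.get?]

-- the value of A's max over the scores, as a membership if-chain
def pvTier (xs : List String) : Int :=
  if "delete_comment" ∈ xs then 3 else if "flag_for_review" ∈ xs then 2
  else if "generate_response" ∈ xs then 1 else 0

theorem pvTier_cons (x : String) (xs : List String) :
    pvTier (x :: xs) = max (pvOrder.getD x 0) (pvTier xs) := by
  rw [pvOrder_getD]
  unfold pvTier
  simp only [List.mem_cons]
  by_cases h1 : x = "delete_comment" <;> by_cases h2 : x = "flag_for_review" <;>
    by_cases h3 : x = "generate_response" <;>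
    simp only [h1, h2, h3, true_or, if_true, if_false] <;>
    split_ifs <;> simp_all

theorem pvFoldl_max_tier (t : List String) (c : Int) (hc : 0 ≤ c) :
    t.foldl (fun a s => max a (pvOrder.getD s 0)) c = max c (pvTier t) := by
  induction t generalizing c with
  | nil =>
    unfold pvTier; simp
    omega
  | cons x t ih =>
    simp only [List.foldl_cons]
    rw [ih _ (le_trans hc (le_max_left _ _)), max_assoc, ← pvTier_cons]

theorem pvScore_eq (xs : List String) : pvScore xs = pvTier xs := by
  cases xs with
  | nil => unfold pvScore pvTier; simp [PySem.List.maxD, PySem.List.max?]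
  | cons x t =>
    unfold pvScore
    simp only [List.map_cons, PySem.List.maxD, PySem.List.max?_id_cons, Option.getD_some,
      List.foldl_map]
    have h0 : (0:Int) ≤ pvOrder.getD x 0 := by rw [pvOrder_getD]; split_ifs <;> omega
    rw [pvFoldl_max_tier t _ h0, ← pvTier_cons]

-- ===== VERDICT (by name: the statement is the Claim_ definition above) =====
theorem prefer_action_order_py_spec : Claim_equal_prefer_action_order_py := by
  intro new_actions ex_actions _
  unfold Spec_prefer_action_order_py prefer_action_order_py prefer_action_order_py_alt
  rw [pvScore_eq, pvScore_eq]
  unfold pvTierLoop pvTierLoop pvTierLoop pvTierLoop pvTier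
  by_cases d1 : "delete_comment" ∈ new_actions <;>
  by_cases f1 : "flag_for_review" ∈ new_actions <;>
  by_cases g1 : "generate_response" ∈ new_actions <;>
  by_cases d2 : "delete_comment" ∈ ex_actions <;>
  by_cases f2 : "flag_for_review" ∈ ex_actions <;>
  by_cases g2 : "generate_response" ∈ ex_actions <;>
  simp [d1, f1, g1, d2, f2, g2]
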